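-- pv_equiv track=rewrite | github.com/Torak28/Misc | Katas/Python/triangle.py | mult_triangle
-- ===== SOURCE A (Python) =====
-- def mult_triangle(n):
--     ret = []
--     for _ in range(n):
--         num = _ + 1
--         first = num
--         step = num
--         tmp = [first]
--         while num < first ** 2:
--             tmp.append(tmp[-1] + step)
--             num += step
--         x = tmp[:-1]
--         ret.extend(tmp + x[::-1])
--         sum_all = sum(ret)
--         sum_even = sum(filter(lambda x: x % 2 == 0, ret))
--         sum_odd = sum_all - sum_even
--     return [sum_all, sum_even, sum_odd]
-- ===== SOURCE B (Python) =====
-- def mult_triangle(n):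
--     sum_all = 0
--     sum_even = 0
--     for k in range(1, n + 1):
--         cube = k * k * k
--         sum_all += cube
--         sum_even += cube if k % 2 == 0 else k * (k * k - 1) // 2
--     return [sum_all, sum_even, sum_all - sum_even]
-- ===== Notes on version B (the rewrite author's own statement) =====
-- stated objective: faster
-- what changed: Instead of materialising each palindromic multiples row and re-summing the whole accumulated list (and re-filtering it for even elements) on every iteration, B accumulates the three sums in one pass using the closed forms k^3 for a row's total and k^3 (k even) / k*(k*k-1)//2 (k odd) for a row's even-element total.
-- outside the precondition, e.g. on mult_triangle(0): A raises UnboundLocalError, B returns [0, 0, 0]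
import Mathlib
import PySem

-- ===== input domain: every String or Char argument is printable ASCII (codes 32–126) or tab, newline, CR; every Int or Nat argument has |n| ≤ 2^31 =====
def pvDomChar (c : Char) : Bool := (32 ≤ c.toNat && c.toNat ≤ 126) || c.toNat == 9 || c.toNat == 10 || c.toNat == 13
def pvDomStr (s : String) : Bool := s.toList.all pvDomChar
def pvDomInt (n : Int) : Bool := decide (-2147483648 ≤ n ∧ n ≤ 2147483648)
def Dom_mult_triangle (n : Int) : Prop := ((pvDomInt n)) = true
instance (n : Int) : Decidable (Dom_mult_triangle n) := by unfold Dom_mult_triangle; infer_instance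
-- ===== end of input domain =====

-- B replaces A's rebuild-and-resum-everything loop by a single pass accumulating
-- per-row closed forms (faster in a timing run: O(n^3) → O(n)).

-- ===== PORT A =====
-- 'while num < first ** 2: tmp.append(tmp[-1] + step); num += step'
-- (the '0 < step' guard only makes the recursion total; every call passes step = num ≥ 1)
def pvWhileA (firstSq step num : Int) (tmp : List Int) : List Int :=
  if h : num < firstSq ∧ 0 < step then
    pvWhileA firstSq step (num + step) (tmp ++ [(PySem.List.pyGet? tmp (-1)).getD 0 + step])
  else tmp
termination_by (firstSq - num).toNat
decreasing_by omega

-- one iteration of A's 'for _ in range(n)' body over the state (ret, sum_all, sum_even, sum_odd)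
def pvStepA (s : List Int × Int × Int × Int) (i : Int) : List Int × Int × Int × Int :=
  let num := i + 1
  let first := num
  let step := num
  let tmp := pvWhileA (first ^ 2) step num [first]
  let x := PySem.List.slice tmp none (some (-1))
  let ret := s.1 ++ (tmp ++ ((PySem.List.slice? x none none (-1)).getD []))
  let sum_all := ret.sum
  let sum_even := (ret.filter (fun y => PySem.Int.mod y 2 == 0)).sum
  (ret, sum_all, sum_even, sum_all - sum_even)

def mult_triangle (n : Int) : List Int :=
  let s := (PySem.List.pyRange 0 n 1).foldl pvStepA ([], 0, 0, 0)
  [s.2.1, s.2.2.1, s.2.2.2]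

-- ===== PORT B =====
-- one iteration of B's 'for k in range(1, n + 1)' body over (sum_all, sum_even)
def pvStepB (s : Int × Int) (k : Int) : Int × Int :=
  let cube := k * k * k
  (s.1 + cube,
   s.2 + (if PySem.Int.mod k 2 == 0 then cube else PySem.Int.floordiv (k * (k * k - 1)) 2))

def mult_triangle_alt (n : Int) : List Int :=
  let p := (PySem.List.pyRange 1 (n + 1) 1).foldl pvStepB (0, 0)
  [p.1, p.2, p.1 - p.2]

-- ===== PRECONDITION & SPEC =====
-- Pre_ excludes exactly n ≤ 0, where Python A raises UnboundLocalError (sum_all never assigned).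
def Pre_mult_triangle (n : Int) : Prop := 1 ≤ n
instance (n : Int) : Decidable (Pre_mult_triangle n) := by unfold Pre_mult_triangle; infer_instance
def pvWitness_mult_triangle : Int := 3

def Spec_mult_triangle (n : Int) (out : List Int) : Prop := out = mult_triangle_alt n
instance (n : Int) (out : List Int) : Decidable (Spec_mult_triangle n out) := by unfold Spec_mult_triangle; infer_instance

-- ===== CLAIM (what is proved, stated in full; the proofs are below) =====
def Claim_equal_mult_triangle : Prop := ∀ (n : Int), Dom_mult_triangle n → Pre_mult_triangle n → Spec_mult_triangle n (mult_triangle n)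

-- ===== LEMMAS AND PROOFS =====

-- A's tmp after j iterations of the while loop: the first j multiples of k
def pvMults (k : Int) (j : Nat) : List Int := (List.range j).map (fun i => k * ((i : Int) + 1))

-- sum of the even elements of a list, as A filters them
def pvEsum (l : List Int) : Int := (l.filter (fun y => PySem.Int.mod y 2 == 0)).sum

theorem pvMod2 (y : Int) : PySem.Int.mod y 2 = y % 2 :=
  PySem.Int.mod_eq_emod_of_pos (by norm_num)

theorem pvMults_succ (k : Int) (j : Nat) :
    pvMults k (j + 1) = pvMults k j ++ [k * ((j : Int) + 1)] := by
  simp [pvMults, List.range_succ]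

theorem pvEsum_append (a b : List Int) : pvEsum (a ++ b) = pvEsum a + pvEsum b := by
  simp [pvEsum, List.filter_append]

theorem pvEsum_reverse (a : List Int) : pvEsum a.reverse = pvEsum a := by
  simp [pvEsum, List.filter_reverse]

theorem pvEsum_singleton (x : Int) :
    pvEsum [x] = if x % 2 = 0 then x else 0 := by
  by_cases h : x % 2 = 0 <;> simp [pvEsum, pvMod2, h]

theorem pvWhileA_char (k : Int) (hk : 1 ≤ k) :
    ∀ (d j : Nat), k.toNat - j = d → 1 ≤ j → (j : Int) ≤ k →
      pvWhileA (k ^ 2) k ((j : Int) * k) (pvMults k j) = pvMults k k.toNat := by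
  intro d
  induction d with
  | zero =>
    intro j hd h1 h2
    have hj : j = k.toNat := by omega
    subst hj
    rw [pvWhileA, dif_neg]
    rintro ⟨h3, -⟩
    have hkk : ((k.toNat : Nat) : Int) = k := by omega
    rw [hkk] at h3
    nlinarith
  | succ d ih =>
    intro j hd h1 h2
    have hjlt : (j : Int) < k := by omega
    rw [pvWhileA, dif_pos ⟨by nlinarith, by omega⟩]
    cases j with
    | zero => omega
    | succ m =>
      have hget : (PySem.List.pyGet? (pvMults k (m + 1)) (-1)).getD 0 = k * ((m : Int) + 1) := by
        rw [pvMults_succ, PySem.List.pyGet?_neg_one_append_singleton, Option.getD_some]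
      rw [hget]
      have hlist : pvMults k (m + 1) ++ [k * ((m : Int) + 1) + k] = pvMults k (m + 1 + 1) := by
        rw [pvMults_succ k (m + 1)]
        congr 2
        push_cast
        ring
      have hnum : ((m + 1 : Nat) : Int) * k + k = ((m + 1 + 1 : Nat) : Int) * k := by
        push_cast
        ring
      rw [hlist, hnum]
      exact ih (m + 1 + 1) (by omega) (by omega) (by omega)

theorem pvSum_mults (k : Int) (j : Nat) :
    2 * (pvMults k j).sum = k * (j : Int) * ((j : Int) + 1) := by
  induction j with
  | zero => simp [pvMults]
  | succ j ih =>
    rw [pvMults_succ, List.sum_append]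
    simp only [List.sum_cons, List.sum_nil]
    push_cast
    push_cast at ih
    linear_combination ih

theorem pvEsum_mults_even (k : Int) (hk : k % 2 = 0) (j : Nat) :
    pvEsum (pvMults k j) = (pvMults k j).sum := by
  induction j with
  | zero => simp [pvMults, pvEsum]
  | succ j ih =>
    rw [pvMults_succ, pvEsum_append, List.sum_append, ih, pvEsum_singleton]
    have h2 : (k * ((j : Int) + 1)) % 2 = 0 :=
      Int.emod_eq_zero_of_dvd ((Int.dvd_of_emod_eq_zero hk).mul_right _)
    simp [h2]

theorem pvEsum_mults_odd (k : Int) (hk : k % 2 = 1) (j : Nat) :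
    pvEsum (pvMults k j) = k * ((j / 2 : Nat) : Int) * (((j / 2 : Nat) : Int) + 1) := by
  induction j with
  | zero => simp [pvMults, pvEsum]
  | succ j ih =>
    rw [pvMults_succ, pvEsum_append, ih, pvEsum_singleton]
    rcases Nat.even_or_odd j with ⟨m, hm⟩ | ⟨m, hm⟩
    · -- j = 2m even, so the new element k*(j+1) is odd
      have hodd : (k * ((j : Int) + 1)) % 2 ≠ 0 := by
        rw [Int.mul_emod, hk]
        omega
      have hd : (j + 1) / 2 = j / 2 := by omega
      simp [hodd, hd]
    · -- j = 2m+1 odd, so the new element is even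
      have heven : (k * ((j : Int) + 1)) % 2 = 0 := by
        rw [Int.mul_emod, hk]
        omega
      have hd1 : (j + 1) / 2 = m + 1 := by omega
      have hd2 : j / 2 = m := by omega
      rw [hd2] at *
      simp only [heven, if_pos rfl, hd1]
      push_cast
      subst hm
      push_cast
      ring

-- one full row of A: the while-built multiples list followed by its reversed dropLast,
-- with its total and even-element sums in the closed forms B uses
theorem pvRow (k : Int) (hk : 1 ≤ k) :
    ∃ row : List Int,
      pvWhileA (k ^ 2) k k [k] ++
          ((PySem.List.slice? (PySem.List.slice (pvWhileA (k ^ 2) k k [k]) none (some (-1)))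
              none none (-1)).getD []) = row ∧
      row.sum = k * k * k ∧
      pvEsum row = (if PySem.Int.mod k 2 == 0 then k * k * k
                    else PySem.Int.floordiv (k * (k * k - 1)) 2) := by
  have hK : ((k.toNat : Nat) : Int) = k := by omega
  have hK1 : 1 ≤ k.toNat := by omega
  have htmp : pvWhileA (k ^ 2) k k [k] = pvMults k k.toNat := by
    have h1 : pvMults k 1 = [k] := by simp [pvMults]
    have := pvWhileA_char k hk (k.toNat - 1) 1 rfl le_rfl (by omega)
    rw [h1] at this
    simpa using this
  have hdrop : (pvMults k k.toNat).dropLast = pvMults k (k.toNat - 1) := by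
    have hKe : pvMults k k.toNat
        = pvMults k (k.toNat - 1) ++ [k * ((((k.toNat - 1 : Nat)) : Int) + 1)] := by
      conv_lhs => rw [show k.toNat = (k.toNat - 1) + 1 from by omega, pvMults_succ]
    rw [hKe, List.dropLast_concat]
  refine ⟨pvMults k k.toNat ++ (pvMults k (k.toNat - 1)).reverse, ?_, ?_, ?_⟩
  · rw [htmp, PySem.List.slice_to_neg_one, PySem.List.slice?_none_none_neg_one,
        Option.getD_some, hdrop]
  · rw [List.sum_append, List.sum_reverse]
    have h1 := pvSum_mults k k.toNat
    have h2 := pvSum_mults k (k.toNat - 1)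
    rw [hK] at h1
    have hc : ((k.toNat - 1 : Nat) : Int) = k - 1 := by omega
    rw [hc] at h2
    have hdbl : 2 * ((pvMults k k.toNat).sum + (pvMults k (k.toNat - 1)).sum)
        = 2 * (k * k * k) := by linear_combination h1 + h2
    linarith
  · rw [pvEsum_append, pvEsum_reverse]
    by_cases hpar : k % 2 = 0
    · have hb : (PySem.Int.mod k 2 == 0) = true := by simp [pvMod2, hpar]
      rw [hb, if_pos rfl, pvEsum_mults_even k hpar, pvEsum_mults_even k hpar,
          ← List.sum_reverse (pvMults k (k.toNat - 1)), ← List.sum_append]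
      have h1 := pvSum_mults k k.toNat
      have h2 := pvSum_mults k (k.toNat - 1)
      rw [hK] at h1
      have hc : ((k.toNat - 1 : Nat) : Int) = k - 1 := by omega
      rw [hc] at h2
      rw [List.sum_append, List.sum_reverse]
      have hdbl : 2 * ((pvMults k k.toNat).sum + (pvMults k (k.toNat - 1)).sum)
          = 2 * (k * k * k) := by linear_combination h1 + h2
      linarith
    · have hpar1 : k % 2 = 1 := by omega
      have hb : (PySem.Int.mod k 2 == 0) = false := by simp [pvMod2, hpar1]
      rw [hb, if_neg (by simp)]
      have e1 := pvEsum_mults_odd k hpar1 k.toNat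
      have e2 := pvEsum_mults_odd k hpar1 (k.toNat - 1)
      have hdd : (k.toNat - 1) / 2 = k.toNat / 2 := by omega
      rw [hdd] at e2
      rw [e1, e2]
      have hq : k = 2 * ((k.toNat / 2 : Nat) : Int) + 1 := by omega
      rw [PySem.Int.floordiv_eq_ediv_of_pos (by norm_num)]
      have key : k * (k * k - 1) =
          2 * (k * ((k.toNat / 2 : Nat) : Int) * (((k.toNat / 2 : Nat) : Int) + 1) +
               k * ((k.toNat / 2 : Nat) : Int) * (((k.toNat / 2 : Nat) : Int) + 1)) := by
        linear_combination (k * (k + 2 * ((k.toNat / 2 : Nat) : Int) + 1)) * hq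
      rw [key, Int.mul_ediv_cancel_left _ (by norm_num : (2 : Int) ≠ 0)]

theorem pvFoldAB (m : Nat) :
    ∃ r : List Int,
      (PySem.List.pyRange 0 (m : Int) 1).foldl pvStepA ([], 0, 0, 0)
        = (r, r.sum, pvEsum r, r.sum - pvEsum r) ∧
      (PySem.List.pyRange 1 ((m : Int) + 1) 1).foldl pvStepB (0, 0) = (r.sum, pvEsum r) := by
  induction m with
  | zero =>
    refine ⟨[], ?_, ?_⟩ <;>
      simp [PySem.List.pyRange_one_eq_nil (by norm_num : (0 : Int) ≤ 0),
            PySem.List.pyRange_one_eq_nil (by norm_num : (1 : Int) ≤ 1), pvEsum]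
  | succ m ih =>
    obtain ⟨r, hA, hB⟩ := ih
    obtain ⟨row, hrow, hsum, hesum⟩ := pvRow ((m : Int) + 1) (by omega)
    have hr1 : PySem.List.pyRange 0 ((m + 1 : Nat) : Int) 1
        = PySem.List.pyRange 0 (m : Int) 1 ++ [(m : Int)] := by
      push_cast
      exact PySem.List.pyRange_one_succ_right (by positivity)
    have hr2 : PySem.List.pyRange 1 (((m + 1 : Nat) : Int) + 1) 1
        = PySem.List.pyRange 1 ((m : Int) + 1) 1 ++ [(m : Int) + 1] := by
      push_cast
      exact PySem.List.pyRange_one_succ_right (by omega)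
    refine ⟨r ++ row, ?_, ?_⟩
    · rw [hr1, List.foldl_append, hA]
      simp only [List.foldl_cons, List.foldl_nil, pvStepA]
      rw [hrow]
      rfl
    · rw [hr2, List.foldl_append, hB]
      simp only [List.foldl_cons, List.foldl_nil, pvStepB]
      rw [List.sum_append, hsum, pvEsum_append, hesum]

-- ===== VERDICT (by name: the statement is the Claim_ definition above) =====
theorem mult_triangle_spec : Claim_equal_mult_triangle := by
  intro n _ hpre
  unfold Spec_mult_triangle
  have hn : n = ((n.toNat : Nat) : Int) := by unfold Pre_mult_triangle at hpre; omega
  obtain ⟨r, hA, hB⟩ := pvFoldAB n.toNat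
  rw [hn]
  simp only [mult_triangle, mult_triangle_alt, hA, hB]
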